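-- pv_equiv track=rewrite | github.com/kubashh/v8 | test/gdb-server/debug_stub_test.py | DecodeEscaping
-- ===== SOURCE A (Python) =====
-- def DecodeEscaping(data):
--   ret = ''
--   last = None
--   repeat = False
--   escape = False
--   for byte in data:
--     if escape:
--       last = chr(ord(byte) ^ 0x20)
--       ret += last
--       escape = False
--     elif repeat:
--       count = ord(byte) - 29
--       assert count >= 3 and count <= 97
--       assert byte != '$' and byte != '#'
--       ret += last * count
--       repeat = False
--     elif byte == '}':
--       escape = True
--     elif byte == '*':
--       assert last is not None
--       repeat = True
--     else:
--       ret += byte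
--       last = byte
--   return ret
-- ===== SOURCE B (Python) =====
-- def DecodeEscaping(data):
--   # Two staged passes: first tokenize the stream into literal / repeat tokens
--   # (resolving escapes and dropping a dangling trailing marker), then expand
--   # the token list while tracking the last emitted literal.
--   toks = []
--   i, n = 0, len(data)
--   while i < n:
--     c = data[i]
--     if c == '}' or c == '*':
--       if i + 1 >= n:
--         break
--       b = data[i + 1]
--       if c == '}':
--         toks.append(('lit', chr(ord(b) ^ 0x20)))
--       else:
--         count = ord(b) - 29
--         assert 3 <= count <= 97 and b != '$' and b != '#'
--         toks.append(('rep', count))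
--       i += 2
--     else:
--       toks.append(('lit', c))
--       i += 1
--   out = []
--   last = None
--   for kind, v in toks:
--     if kind == 'lit':
--       out.append(v)
--       last = v
--     else:
--       assert last is not None
--       out.append(last * v)
--   return ''.join(out)
-- ===== Notes on version B (the rewrite author's own statement) =====
-- stated objective: alternative
-- what changed: Replaced A's one-pass boolean-flag state machine with a two-stage pipeline: a tokenizer that resolves escape pairs and repeat markers into an explicit literal/repeat token list, then a separate expansion pass over the tokens tracking the last literal.
import Mathlib
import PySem

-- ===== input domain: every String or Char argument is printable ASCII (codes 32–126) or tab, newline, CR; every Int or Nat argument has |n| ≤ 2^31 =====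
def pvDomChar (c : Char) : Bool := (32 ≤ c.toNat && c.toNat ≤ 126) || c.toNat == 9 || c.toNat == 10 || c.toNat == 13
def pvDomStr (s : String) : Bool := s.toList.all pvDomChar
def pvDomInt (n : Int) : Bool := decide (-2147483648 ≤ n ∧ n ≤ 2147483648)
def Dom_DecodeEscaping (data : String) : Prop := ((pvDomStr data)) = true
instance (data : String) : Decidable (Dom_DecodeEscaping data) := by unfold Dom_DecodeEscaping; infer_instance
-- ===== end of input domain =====

-- B replaces A's boolean-flag state machine by a two-stage tokenize-then-expand pipeline; return-value equivalence only.

-- ===== PORT A =====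
-- State of A's loop: (ret, last, repeat, escape); ret is built as a List Char.
-- A's asserts raise exactly on the inputs Pre_DecodeEscaping excludes; the port continues there.
def decAStep (st : List Char × Option Char × Bool × Bool) (byte : Char) :
    List Char × Option Char × Bool × Bool :=
  if st.2.2.2 then
    (st.1 ++ [Char.ofNat (byte.toNat ^^^ 0x20)], some (Char.ofNat (byte.toNat ^^^ 0x20)),
      st.2.2.1, false)
  else if st.2.2.1 then
    (st.1 ++ List.replicate (byte.toNat - 29) (st.2.1.getD ' '), st.2.1, false, st.2.2.2)
  else if byte = '}' then (st.1, st.2.1, st.2.2.1, true)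
  else if byte = '*' then (st.1, st.2.1, true, st.2.2.2)
  else (st.1 ++ [byte], some byte, st.2.2.1, st.2.2.2)

def DecodeEscaping (data : String) : String :=
  String.mk (data.toList.foldl decAStep ([], none, false, false)).1

-- ===== PORT B =====
-- Stage 1 of Source B: the tokenizer's while loop (index-driven with lookahead), building tokens.
inductive DTok
  | lit : Char → DTok
  | rep : Nat → DTok
deriving DecidableEq, Repr

def decAltToks (l : List Char) (n : Nat) (i : Nat) : List DTok :=
  if _h : i < n then
    let c := l.getD i ' '
    if c = '}' ∨ c = '*' then
      if n ≤ i + 1 then []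
      else
        let b := l.getD (i + 1) ' '
        -- Source B asserts the count range / '$' '#' here; those inputs are outside Pre_
        (if c = '}' then DTok.lit (Char.ofNat (b.toNat ^^^ 0x20)) else DTok.rep (b.toNat - 29))
          :: decAltToks l n (i + 2)
    else DTok.lit c :: decAltToks l n (i + 1)
  else []
termination_by n - i
decreasing_by all_goals omega

-- Stage 2 of Source B: expansion fold over the token list, state (out, last).
-- Source B asserts last is not None on a rep token; those inputs are outside Pre_.
def decAltStep (st : List Char × Option Char) (t : DTok) : List Char × Option Char :=
  match t with
  | DTok.lit c => (st.1 ++ [c], some c)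
  | DTok.rep k => (st.1 ++ List.replicate k (st.2.getD ' '), st.2)

def DecodeEscaping_alt (data : String) : String :=
  String.mk ((decAltToks data.toList data.toList.length 0).foldl decAltStep ([], none)).1

-- ===== PRECONDITION & SPEC =====
-- Well-formedness of the escape/RLE stream (a grammar check, not a run of either decoder):
-- every '*' repeat marker is preceded by some emitted literal and, if it has a count byte,
-- that byte's code is in [32,126] and it is not '$' or '#' — exactly the inputs on which
-- A's asserts do not fire (A returns normally there).
def decPreOk : List Char → Bool → Bool
  | [], _ => true
  | (c :: rest), hasLast =>
    if c = '}' then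
      match rest with
      | [] => true
      | _ :: rest' => decPreOk rest' true
    else if c = '*' then
      hasLast &&
        (match rest with
          | [] => true
          | b :: rest' =>
            decide (32 ≤ b.toNat ∧ b.toNat ≤ 126) && b ≠ '$' && b ≠ '#' && decPreOk rest' hasLast)
    else decPreOk rest true

def Pre_DecodeEscaping (data : String) : Prop := decPreOk data.toList false = true
instance (data : String) : Decidable (Pre_DecodeEscaping data) := by
  unfold Pre_DecodeEscaping; infer_instance

def pvWitness_DecodeEscaping : String := "ab*0c"

def Spec_DecodeEscaping (data : String) (out : String) : Prop := out = DecodeEscaping_alt data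
instance (data : String) (out : String) : Decidable (Spec_DecodeEscaping data out) := by
  unfold Spec_DecodeEscaping; infer_instance

-- ===== CLAIM (what is proved, stated in full; the proofs are below) =====
def Claim_equal_DecodeEscaping : Prop := ∀ (data : String), Dom_DecodeEscaping data → Pre_DecodeEscaping data → Spec_DecodeEscaping data (DecodeEscaping data)

-- ===== LEMMAS AND PROOFS =====

-- common recursive reference decoder
def decRef : List Char → Option Char → List Char
  | [], _ => []
  | [c], _ => if c = '}' then [] else if c = '*' then [] else [c]
  | c :: b :: rest, last =>
    if c = '}' then
      Char.ofNat (b.toNat ^^^ 0x20) :: decRef rest (some (Char.ofNat (b.toNat ^^^ 0x20)))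
    else if c = '*' then
      List.replicate (b.toNat - 29) (last.getD ' ') ++ decRef rest last
    else c :: decRef (b :: rest) (some c)

theorem foldA_eq_decRef (n : Nat) :
    ∀ l : List Char, l.length ≤ n → ∀ (acc : List Char) (last : Option Char),
      (l.foldl decAStep (acc, last, false, false)).1 = acc ++ decRef l last := by
  induction n with
  | zero =>
      intro l hl acc last
      have : l = [] := List.eq_nil_of_length_eq_zero (Nat.le_zero.mp hl)
      subst this; simp [decRef]
  | succ n ih =>
      intro l hl acc last
      match l with
      | [] => simp [decRef]
      | [c] =>
          by_cases hc : c = '}'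
          · subst hc; simp [decRef, decAStep]
          · by_cases hs : c = '*'
            · subst hs; simp [decRef, decAStep]
            · simp [decRef, decAStep, hc, hs]
      | c :: b :: rest =>
          have hr : rest.length ≤ n := by simp at hl; omega
          have hr1 : (b :: rest).length ≤ n := by simp at hl ⊢; omega
          by_cases hc : c = '}'
          · subst hc
            simp only [List.foldl, decRef, if_pos rfl]
            have h1 : decAStep (acc, last, false, false) '}' = (acc, last, false, true) := by
              simp [decAStep]
            have h2 : decAStep (acc, last, false, true) b =
                (acc ++ [Char.ofNat (b.toNat ^^^ 0x20)],
                  some (Char.ofNat (b.toNat ^^^ 0x20)), false, false) := by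
              simp [decAStep]
            rw [h1, h2, ih rest hr]
            simp
          · by_cases hs : c = '*'
            · subst hs
              simp only [List.foldl, decRef, hc, if_neg hc, if_pos rfl]
              have h1 : decAStep (acc, last, false, false) '*' = (acc, last, true, false) := by
                simp [decAStep]
              have h2 : decAStep (acc, last, true, false) b =
                  (acc ++ List.replicate (b.toNat - 29) (last.getD ' '), last, false, false) := by
                simp [decAStep]
              rw [h1, h2, ih rest hr]
              simp
            · simp only [List.foldl, decRef, if_neg hc, if_neg hs]
              have h1 : decAStep (acc, last, false, false) c = (acc ++ [c], some c, false, false) := by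
                simp [decAStep, hc, hs]
              rw [h1]
              have := ih (b :: rest) hr1 (acc ++ [c]) (some c)
              simp only [List.foldl] at this
              rw [this]
              simp

theorem foldAlt_eq_decRef (l : List Char) (i : Nat) (last : Option Char) (acc : List Char) :
    ((decAltToks l l.length i).foldl decAltStep (acc, last)).1 = acc ++ decRef (l.drop i) last := by
  induction hfuel : l.length - i using Nat.strong_induction_on generalizing i last acc with
  | _ fuel ih =>
    subst hfuel
    by_cases hi : i < l.length
    · have hdrop : l.drop i = l[i] :: l.drop (i + 1) := List.drop_eq_getElem_cons hi
      have hget : l.getD i ' ' = l[i] := by simp [List.getD_eq_getElem?_getD, hi]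
      rw [decAltToks, dif_pos hi]
      simp only [hget]
      by_cases hm : l[i] = '}' ∨ l[i] = '*'
      · rw [if_pos hm]
        by_cases hn : l.length ≤ i + 1
        · rw [if_pos hn]
          have hdrop1 : l.drop (i + 1) = [] := List.drop_eq_nil_of_le hn
          rw [hdrop, hdrop1]
          rcases hm with hc | hs
          · simp [decRef, hc, List.foldl]
          · simp [decRef, hs, List.foldl]
        · rw [if_neg hn]
          push_neg at hn
          have hdrop1 : l.drop (i + 1) = l[i + 1] :: l.drop (i + 2) :=
            List.drop_eq_getElem_cons hn
          have hget1 : l.getD (i + 1) ' ' = l[i + 1] := by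
            simp [List.getD_eq_getElem?_getD, hn]
          simp only [hget1]
          rcases hm with hc | hs
          · rw [if_pos hc]
            simp only [List.foldl, decAltStep]
            rw [ih (l.length - (i + 2)) (by omega) (i + 2) _ _ rfl, hdrop, hdrop1]
            simp [decRef, hc]
          · have hc : ¬ l[i] = '}' := by
              intro h; rw [h] at hs; exact absurd hs (by decide)
            rw [if_neg hc]
            simp only [List.foldl, decAltStep]
            rw [ih (l.length - (i + 2)) (by omega) (i + 2) _ _ rfl, hdrop, hdrop1]
            simp [decRef, hc, hs]
      · rw [if_neg hm]
        push_neg at hm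
        simp only [List.foldl, decAltStep]
        rw [ih (l.length - (i + 1)) (by omega) (i + 1) _ _ rfl, hdrop]
        cases hdd : l.drop (i + 1) with
        | nil => simp [decRef, hm.1, hm.2]
        | cons b rest => simp [decRef, hm.1, hm.2]
    · rw [decAltToks, dif_neg hi]
      rw [List.drop_eq_nil_of_le (Nat.le_of_not_lt hi)]
      simp [decRef, List.foldl]

-- ===== VERDICT (by name: the statement is the Claim_ definition above) =====
theorem DecodeEscaping_spec : Claim_equal_DecodeEscaping := by
  intro data _ _
  unfold Spec_DecodeEscaping DecodeEscaping DecodeEscaping_alt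
  rw [foldA_eq_decRef data.toList.length data.toList (le_refl _), foldAlt_eq_decRef]
  simp
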